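-- pv_equiv track=rewrite | github.com/claycampbell/InvestBrain | services/one_pager_service.py | _describe_tracking_methodology
-- ===== SOURCE A (Python) =====
-- from typing import Dict, List, Any, Optional
--
-- def _describe_tracking_methodology(detailed_signals: List[Dict]) -> str:
--     """Describe comprehensive tracking methodology"""
--     if not detailed_signals:
--         return "Tracking methodology information unavailable due to insufficient signal data."
--
--     methodology_components = []
--
--     # Analyze signal composition
--     has_core = any('Core Validation' in s.get('signal_type', '') for s in detailed_signals)
--     has_metrics = any('Metrics Tracking' in s.get('signal_type', '') for s in detailed_signals)
--     has_peer = any('Peer Comparison' in s.get('signal_type', '') for s in detailed_signals)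
--
--     if has_core:
--         methodology_components.append("Core Validation Methodology employs direct validation of fundamental thesis assumptions through primary data sources and real-time monitoring systems. This approach ensures critical investment premises are continuously validated against actual performance with immediate alert protocols for threshold breaches.")
--
--     if has_metrics:
--         methodology_components.append("Metrics Tracking Methodology utilizes systematic quantitative monitoring of key performance indicators through automated data collection and statistical analysis. This approach provides objective, measurable validation of thesis assumptions with regular reporting cycles and variance analysis.")
--
--     if has_peer:
--         methodology_components.append("Peer Comparison Methodology implements comprehensive benchmarking against industry peers through multi-dimensional analysis including financial metrics, operational indicators, and strategic positioning assessment.")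
--
--     if not methodology_components:
--         methodology_components.append("Standard monitoring methodology employs systematic data collection and regular performance review across multiple signal categories.")
--
--     return " ".join(methodology_components)
-- ===== SOURCE B (Python) =====
-- from typing import Dict, List, Any, Optional
--
-- _METHODOLOGY_TABLE = [
--     ('Core Validation', "Core Validation Methodology employs direct validation of fundamental thesis assumptions through primary data sources and real-time monitoring systems. This approach ensures critical investment premises are continuously validated against actual performance with immediate alert protocols for threshold breaches."),
--     ('Metrics Tracking', "Metrics Tracking Methodology utilizes systematic quantitative monitoring of key performance indicators through automated data collection and statistical analysis. This approach provides objective, measurable validation of thesis assumptions with regular reporting cycles and variance analysis."),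
--     ('Peer Comparison', "Peer Comparison Methodology implements comprehensive benchmarking against industry peers through multi-dimensional analysis including financial metrics, operational indicators, and strategic positioning assessment."),
-- ]
--
-- def _describe_tracking_methodology(detailed_signals: List[Dict]) -> str:
--     """Describe comprehensive tracking methodology (table-driven single pass)."""
--     if not detailed_signals:
--         return "Tracking methodology information unavailable due to insufficient signal data."
--     present = set()
--     for s in detailed_signals:
--         st = s.get('signal_type', '')
--         for key, _text in _METHODOLOGY_TABLE:
--             if key in st:
--                 present.add(key)
--     parts = [text for key, text in _METHODOLOGY_TABLE if key in present]
--     if not parts: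
--         parts = ["Standard monitoring methodology employs systematic data collection and regular performance review across multiple signal categories."]
--     return " ".join(parts)
-- ===== Notes on version B (the rewrite author's own statement) =====
-- stated objective: simpler
-- what changed: Replaces three separate any()-scans plus three if-append blocks with one table of (key, text) pairs: a single pass over the signals builds a presence set of keys, and the output is emitted by filtering the table against that set.
import Mathlib
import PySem

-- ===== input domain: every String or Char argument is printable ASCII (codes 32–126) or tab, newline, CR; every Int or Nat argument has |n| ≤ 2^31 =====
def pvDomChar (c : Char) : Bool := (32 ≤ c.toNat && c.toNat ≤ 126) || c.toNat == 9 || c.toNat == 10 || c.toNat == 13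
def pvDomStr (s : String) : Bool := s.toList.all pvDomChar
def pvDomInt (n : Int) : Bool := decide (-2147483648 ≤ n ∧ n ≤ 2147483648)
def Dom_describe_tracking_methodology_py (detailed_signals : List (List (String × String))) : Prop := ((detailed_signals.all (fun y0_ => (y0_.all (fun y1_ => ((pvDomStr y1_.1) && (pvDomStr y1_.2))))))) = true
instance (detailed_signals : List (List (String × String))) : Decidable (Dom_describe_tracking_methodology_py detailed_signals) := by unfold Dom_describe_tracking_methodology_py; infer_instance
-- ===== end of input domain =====

-- B replaces A's three separate any()-scans and if-blocks by a table-driven single pass (simpler/alternative).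

-- shared string constants (the exact literals of the Python source)
def pvUnavailText : String := "Tracking methodology information unavailable due to insufficient signal data."
def pvCoreText : String := "Core Validation Methodology employs direct validation of fundamental thesis assumptions through primary data sources and real-time monitoring systems. This approach ensures critical investment premises are continuously validated against actual performance with immediate alert protocols for threshold breaches."
def pvMetricsText : String := "Metrics Tracking Methodology utilizes systematic quantitative monitoring of key performance indicators through automated data collection and statistical analysis. This approach provides objective, measurable validation of thesis assumptions with regular reporting cycles and variance analysis."
def pvPeerText : String := "Peer Comparison Methodology implements comprehensive benchmarking against industry peers through multi-dimensional analysis including financial metrics, operational indicators, and strategic positioning assessment."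
def pvStdText : String := "Standard monitoring methodology employs systematic data collection and regular performance review across multiple signal categories."

-- ===== PORT A =====
def describe_tracking_methodology_py (detailed_signals : List (List (String × String))) : String :=
  if detailed_signals = [] then pvUnavailText
  else
    let has_core := detailed_signals.any (fun s => PySem.Str.isIn "Core Validation" (PySem.Dict.getD (PySem.Dict.mk s) "signal_type" ""))
    let has_metrics := detailed_signals.any (fun s => PySem.Str.isIn "Metrics Tracking" (PySem.Dict.getD (PySem.Dict.mk s) "signal_type" ""))
    let has_peer := detailed_signals.any (fun s => PySem.Str.isIn "Peer Comparison" (PySem.Dict.getD (PySem.Dict.mk s) "signal_type" ""))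
    let mc0 : List String := []
    let mc1 := if has_core then mc0 ++ [pvCoreText] else mc0
    let mc2 := if has_metrics then mc1 ++ [pvMetricsText] else mc1
    let mc3 := if has_peer then mc2 ++ [pvPeerText] else mc2
    let mc4 := if mc3 = [] then mc3 ++ [pvStdText] else mc3
    PySem.Str.join " " mc4

-- ===== PORT B =====
def pvMethodologyTable : List (String × String) :=
  [("Core Validation", pvCoreText), ("Metrics Tracking", pvMetricsText), ("Peer Comparison", pvPeerText)]

def pvPresent (detailed_signals : List (List (String × String))) : PySem.Set String :=
  detailed_signals.foldl (fun acc s =>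
    let st := PySem.Dict.getD (PySem.Dict.mk s) "signal_type" ""
    pvMethodologyTable.foldl (fun acc2 kv => if PySem.Str.isIn kv.1 st then PySem.Set.add acc2 kv.1 else acc2) acc) PySem.Set.empty

def describe_tracking_methodology_py_alt (detailed_signals : List (List (String × String))) : String :=
  if detailed_signals = [] then pvUnavailText
  else
    let present : PySem.Set String := pvPresent detailed_signals
    let parts := (pvMethodologyTable.filter (fun kv => PySem.Set.contains present kv.1)).map (fun kv => kv.2)
    let parts2 := if parts = [] then [pvStdText] else parts
    PySem.Str.join " " parts2

-- ===== PRECONDITION & SPEC =====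
def Spec_describe_tracking_methodology_py (detailed_signals : List (List (String × String))) (out : String) : Prop := out = describe_tracking_methodology_py_alt detailed_signals
instance (detailed_signals : List (List (String × String))) (out : String) : Decidable (Spec_describe_tracking_methodology_py detailed_signals out) := by unfold Spec_describe_tracking_methodology_py; infer_instance

-- ===== CLAIM (what is proved, stated in full; the proofs are below) =====
def Claim_equal_describe_tracking_methodology_py : Prop := ∀ (detailed_signals : List (List (String × String))), Dom_describe_tracking_methodology_py detailed_signals → Spec_describe_tracking_methodology_py detailed_signals (describe_tracking_methodology_py detailed_signals)

-- ===== LEMMAS AND PROOFS =====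

-- one signal's inner table pass: what keys it makes present
lemma contains_inner (acc : PySem.Set String) (st : String) (k : String) :
    PySem.Set.contains
      (pvMethodologyTable.foldl (fun acc2 kv => if PySem.Str.isIn kv.1 st then PySem.Set.add acc2 kv.1 else acc2) acc) k
    = (PySem.Set.contains acc k ||
       ((k == "Core Validation" || k == "Metrics Tracking" || k == "Peer Comparison") && PySem.Str.isIn k st)) := by
  simp only [pvMethodologyTable, List.foldl]
  by_cases h1 : PySem.Str.isIn "Core Validation" st <;>
  by_cases h2 : PySem.Str.isIn "Metrics Tracking" st <;>
  by_cases h3 : PySem.Str.isIn "Peer Comparison" st <;>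
  simp only [h1, h2, h3, if_true, if_false, Bool.false_eq_true, Bool.true_eq_false, ite_true, ite_false] <;>
  by_cases e1 : k = "Core Validation" <;> by_cases e2 : k = "Metrics Tracking" <;>
  by_cases e3 : k = "Peer Comparison" <;>
  simp_all [PySem.Set.mem_add]

-- the presence set: a key is in pvPresent iff some signal's signal_type contains it
lemma contains_pvPresent (ds : List (List (String × String))) (k : String) :
    PySem.Set.contains (pvPresent ds) k
    = ((k == "Core Validation" || k == "Metrics Tracking" || k == "Peer Comparison") &&
       ds.any (fun s => PySem.Str.isIn k (PySem.Dict.getD (PySem.Dict.mk s) "signal_type" ""))) := by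
  have main : ∀ (l : List (List (String × String))) (acc : PySem.Set String),
      PySem.Set.contains
        (l.foldl (fun acc s =>
          let st := PySem.Dict.getD (PySem.Dict.mk s) "signal_type" ""
          pvMethodologyTable.foldl (fun acc2 kv => if PySem.Str.isIn kv.1 st then PySem.Set.add acc2 kv.1 else acc2) acc) acc) k
      = (PySem.Set.contains acc k ||
         ((k == "Core Validation" || k == "Metrics Tracking" || k == "Peer Comparison") &&
          l.any (fun s => PySem.Str.isIn k (PySem.Dict.getD (PySem.Dict.mk s) "signal_type" "")))) := by
    intro l
    induction l with
    | nil => intro acc; simp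
    | cons s rest ih =>
      intro acc
      simp only [List.foldl, List.any_cons]
      rw [ih, contains_inner, Bool.and_or_distrib_left, Bool.or_assoc]
  have h := main ds PySem.Set.empty
  simpa [pvPresent, PySem.Set.empty] using h

-- ===== VERDICT (by name: the statement is the Claim_ definition above) =====
theorem describe_tracking_methodology_py_spec : Claim_equal_describe_tracking_methodology_py := by
  intro ds _
  unfold Spec_describe_tracking_methodology_py describe_tracking_methodology_py describe_tracking_methodology_py_alt
  by_cases hempty : ds = []
  · simp only [hempty, if_true, ite_true]
  · simp only [hempty, if_false, ite_false]
    simp only [pvMethodologyTable, List.filter_cons, List.filter_nil]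
    rw [contains_pvPresent, contains_pvPresent, contains_pvPresent]
    by_cases h1 : ds.any (fun s => PySem.Str.isIn "Core Validation" (PySem.Dict.getD (PySem.Dict.mk s) "signal_type" "")) <;>
    by_cases h2 : ds.any (fun s => PySem.Str.isIn "Metrics Tracking" (PySem.Dict.getD (PySem.Dict.mk s) "signal_type" "")) <;>
    by_cases h3 : ds.any (fun s => PySem.Str.isIn "Peer Comparison" (PySem.Dict.getD (PySem.Dict.mk s) "signal_type" "")) <;>
    simp only [h1, h2, h3, if_true, if_false, ite_true, ite_false, Bool.true_and, Bool.false_and,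
      Bool.and_true, Bool.and_false, List.map_cons, List.map_nil, List.append_nil, List.nil_append,
      List.cons_append, decide_true, decide_false, reduceIte] <;> rfl
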